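-- pv_equiv track=rewrite | github.com/nihilistau/shannon-prime | backends/torch/vht2_cuda_bridge.py | _prime_pairs_with_gap
-- ===== SOURCE A (Python) =====
-- def _prime_pairs_with_gap(n: int, gap: int, _is_prime=None) -> list[tuple[int, int]]:
--     """
--     Return spectral-index pairs (i, j) where i+1 and j+1 are primes with
--     j-i == gap. Greedy-deduplicated so all returned pairs are disjoint.
--
--     gap=2  : twin primes      (3-5, 11-13, 17-19, ...)
--     gap=4  : cousin primes    (3-7, 7-11, 13-17, 19-23, ...)
--     gap=6  : sexy primes      (5-11, 7-13, 11-17, 13-19, ...)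
--     gap=2k : larger Goldbach-style pairs
--
--     The Goldbach-extended view: any even gap counts. Larger gaps
--     correspond to weaker arithmetical neighborhoods, so callers should
--     typically scale the borrow alpha down for larger-gap pairs.
--     """
--     if _is_prime is None:
--         def is_prime(k: int) -> bool:
--             if k < 2:    return False
--             if k < 4:    return True
--             if k % 2 == 0: return False
--             d = 3
--             while d * d <= k:
--                 if k % d == 0: return False
--                 d += 2
--             return True
--         _is_prime = is_prime
--
--     raw_pairs = []
--     for p in range(2, n - gap + 1):
--         if _is_prime(p) and _is_prime(p + gap):
--             raw_pairs.append((p - 1, p + gap - 1))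
--
--     seen = set()
--     pairs = []
--     for i, j in raw_pairs:
--         if i in seen or j in seen:
--             continue
--         pairs.append((i, j))
--         seen.add(i); seen.add(j)
--     return pairs
-- ===== SOURCE B (Python) =====
-- def _prime_pairs_with_gap(n: int, gap: int, _is_prime=None) -> list[tuple[int, int]]:
--     """Same result as A, but primality comes from a sieve of Eratosthenes
--     and the scan + greedy dedup are fused into one pass."""
--     if _is_prime is None:
--         limit = n if n >= n - gap else n - gap
--         composite = set()
--         p = 2
--         while p * p <= limit:
--             for m in range(p * p, limit + 1, p):
--                 composite.add(m)
--             p += 1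
--         _is_prime = lambda k: 2 <= k <= limit and k not in composite
--     seen = set()
--     pairs = []
--     for q in range(2, n - gap + 1):
--         if _is_prime(q) and _is_prime(q + gap):
--             i, j = q - 1, q + gap - 1
--             if i not in seen and j not in seen:
--                 pairs.append((i, j))
--                 seen.add(i)
--                 seen.add(j)
--     return pairs
-- ===== Notes on version B (the rewrite author's own statement) =====
-- stated objective: faster
-- what changed: A tests each candidate by trial division (O(sqrt(k)) per number); B precomputes one sieve-of-Eratosthenes composite set up to max(n, n-gap) and answers each primality query by a set lookup, fusing the pair scan and the greedy dedup into a single pass.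
import Mathlib
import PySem

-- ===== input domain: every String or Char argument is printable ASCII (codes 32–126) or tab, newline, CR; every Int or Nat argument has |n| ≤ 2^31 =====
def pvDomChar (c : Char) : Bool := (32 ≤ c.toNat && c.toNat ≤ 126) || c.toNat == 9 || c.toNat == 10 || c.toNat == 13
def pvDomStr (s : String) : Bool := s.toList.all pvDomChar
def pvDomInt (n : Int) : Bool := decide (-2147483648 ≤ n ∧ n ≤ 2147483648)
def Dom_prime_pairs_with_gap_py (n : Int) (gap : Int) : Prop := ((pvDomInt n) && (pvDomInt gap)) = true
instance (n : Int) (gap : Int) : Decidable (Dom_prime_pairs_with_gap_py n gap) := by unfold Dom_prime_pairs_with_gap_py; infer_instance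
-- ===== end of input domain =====

-- B replaces A's per-number trial division by one sieve of Eratosthenes and fuses the
-- pair scan with the greedy dedup into a single pass (objective: faster).

-- ===== PORT A =====
-- the `while d * d <= k` trial-division loop of A's inner is_prime (called with d = 3, step 2)
def pvTrialLoop (k : Int) (d : Int) : Bool :=
  if _hle : d * d ≤ k then
    if PySem.Int.mod k d == 0 then false
    else pvTrialLoop k (d + 2)
  else true
termination_by (k + 2 - d).toNat
decreasing_by
  have hd : d < k + 2 := by
    by_cases h1 : 1 ≤ d
    · nlinarith
    · nlinarith [mul_self_nonneg d]
  omega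

-- A's default is_prime
def pvIsPrimeA (k : Int) : Bool :=
  if k < 2 then false
  else if k < 4 then true
  else if PySem.Int.mod k 2 == 0 then false
  else pvTrialLoop k 3

def prime_pairs_with_gap_py (n : Int) (gap : Int) : List (Int × Int) :=
  let raw_pairs := (PySem.List.pyRange 2 (n - gap + 1) 1).foldl
      (fun acc p => if pvIsPrimeA p && pvIsPrimeA (p + gap) then acc ++ [(p - 1, p + gap - 1)] else acc) []
  let res := raw_pairs.foldl
      (fun (st : PySem.Set Int × List (Int × Int)) ij =>
        if st.1.contains ij.1 || st.1.contains ij.2 then st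
        else ((st.1.add ij.1).add ij.2, st.2 ++ [ij]))
      (PySem.Set.empty, [])
  res.2

-- ===== PORT B =====
-- B's sieve: `while p * p <= limit: for m in range(p*p, limit+1, p): composite.add(m); p += 1`
-- (the inner for-loop of adds over the range is Set.update = the fold of Set.add over the range)
def pvSieveLoop (limit : Int) (composite : PySem.Set Int) (p : Int) : PySem.Set Int :=
  if _hle : p * p ≤ limit then
    pvSieveLoop limit (composite.update (PySem.List.pyRange (p * p) (limit + 1) p)) (p + 1)
  else composite
termination_by (limit + 1 - p).toNat
decreasing_by
  have hp : p < limit + 1 := by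
    by_cases h1 : 1 ≤ p
    · nlinarith
    · nlinarith [mul_self_nonneg p]
  omega

-- B's `_is_prime = lambda k: 2 <= k <= limit and k not in composite`
def pvIsPrimeB (limit : Int) (composite : PySem.Set Int) (k : Int) : Bool :=
  decide (2 ≤ k) && decide (k ≤ limit) && !(composite.contains k)

def prime_pairs_with_gap_py_alt (n : Int) (gap : Int) : List (Int × Int) :=
  let limit := if n ≥ n - gap then n else n - gap
  let composite := pvSieveLoop limit PySem.Set.empty 2
  let res := (PySem.List.pyRange 2 (n - gap + 1) 1).foldl
      (fun (st : PySem.Set Int × List (Int × Int)) q =>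
        if pvIsPrimeB limit composite q && pvIsPrimeB limit composite (q + gap) then
          if !(st.1.contains (q - 1)) && !(st.1.contains (q + gap - 1)) then
            ((st.1.add (q - 1)).add (q + gap - 1), st.2 ++ [(q - 1, q + gap - 1)])
          else st
        else st)
      (PySem.Set.empty, [])
  res.2

-- ===== PRECONDITION & SPEC =====
def Spec_prime_pairs_with_gap_py (n : Int) (gap : Int) (out : List (Int × Int)) : Prop :=
  out = prime_pairs_with_gap_py_alt n gap
instance (n : Int) (gap : Int) (out : List (Int × Int)) : Decidable (Spec_prime_pairs_with_gap_py n gap out) := by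
  unfold Spec_prime_pairs_with_gap_py; infer_instance

-- ===== CLAIM =====
def Claim_equal_prime_pairs_with_gap_py : Prop :=
  ∀ (n : Int) (gap : Int), Dom_prime_pairs_with_gap_py n gap →
    Spec_prime_pairs_with_gap_py n gap (prime_pairs_with_gap_py n gap)

-- ===== LEMMAS AND PROOFS =====

-- characterisation of A's trial-division loop (for d ≥ 1; A calls it with d = 3)
theorem pvTrialLoop_eq_false_iff (k : Int) (d : Int) :
    1 ≤ d → (pvTrialLoop k d = false ↔ ∃ e, d ≤ e ∧ e * e ≤ k ∧ 2 ∣ (e - d) ∧ e ∣ k) := by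
  refine pvTrialLoop.induct k
    (motive := fun d => 1 ≤ d →
      (pvTrialLoop k d = false ↔ ∃ e, d ≤ e ∧ e * e ≤ k ∧ 2 ∣ (e - d) ∧ e ∣ k))
    ?_ ?_ ?_ d
  · intro d hle hmod _
    rw [pvTrialLoop]
    simp only [dif_pos hle, if_pos hmod]
    have hdvd : d ∣ k := (PySem.Int.mod_eq_zero_iff_dvd k d).1 (by simpa using hmod)
    exact iff_of_true (by trivial) ⟨d, le_refl d, hle, by simp, hdvd⟩
  · intro d hle hmod ih hd
    rw [pvTrialLoop]
    simp only [dif_pos hle, if_neg hmod]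
    rw [ih (by omega)]
    constructor
    · rintro ⟨e, he, hee, hpar, hdvd⟩
      exact ⟨e, by omega, hee, by omega, hdvd⟩
    · rintro ⟨e, he, hee, hpar, hdvd⟩
      rcases eq_or_lt_of_le he with rfl | hlt
      · refine absurd ?_ hmod
        rw [beq_iff_eq]
        exact (PySem.Int.mod_eq_zero_iff_dvd k d).2 hdvd
      · exact ⟨e, by omega, hee, by omega, hdvd⟩
  · intro d hle hd
    rw [pvTrialLoop]
    simp only [dif_neg hle]
    refine iff_of_false (by simp) ?_
    rintro ⟨e, he, hee, -, -⟩
    exact hle (le_trans (by nlinarith : d * d ≤ e * e) hee)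

-- A's is_prime says "2 ≤ k and no divisor e with 2 ≤ e and e*e ≤ k"
theorem pvIsPrimeA_eq_true_iff (k : Int) :
    pvIsPrimeA k = true ↔ (2 ≤ k ∧ ∀ e, 2 ≤ e → e * e ≤ k → ¬ e ∣ k) := by
  unfold pvIsPrimeA
  split_ifs with h1 h2 h3
  · simp; omega
  · refine iff_of_true (by trivial) ⟨by omega, fun e he hee hdvd => ?_⟩
    nlinarith
  · have h2k : (2 : Int) ∣ k := (PySem.Int.mod_eq_zero_iff_dvd k 2).1 (by simpa using h3)
    refine iff_of_false (by simp) ?_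
    rintro ⟨-, hall⟩
    exact hall 2 (by norm_num) (by omega) h2k
  · have hodd : ¬ (2 : Int) ∣ k := fun hd =>
      h3 (by rw [beq_iff_eq]; exact (PySem.Int.mod_eq_zero_iff_dvd k 2).2 hd)
    have hchar := pvTrialLoop_eq_false_iff k 3 (by norm_num)
    constructor
    · intro ht
      refine ⟨by omega, fun e he hee hdvd => ?_⟩
      have he2 : ¬ (2 : Int) ∣ e := fun h2e => hodd (h2e.trans hdvd)
      have hf : pvTrialLoop k 3 = false := hchar.2 ⟨e, by omega, hee, by omega, hdvd⟩
      simp [hf] at ht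
    · rintro ⟨-, hall⟩
      by_contra hfalse
      have hf : pvTrialLoop k 3 = false := by
        cases hh : pvTrialLoop k 3
        · rfl
        · exact absurd hh hfalse
      obtain ⟨e, he, hee, -, hdvd⟩ := hchar.1 hf
      exact hall e (by omega) hee hdvd

-- membership in the sieve's composite set, for the outer while-loop started at p
theorem pvSieveLoop_mem (limit : Int) (s : PySem.Set Int) (p : Int) :
    1 ≤ p → ∀ x : Int, (x ∈ pvSieveLoop limit s p ↔
      x ∈ s ∨ ∃ q, p ≤ q ∧ q * q ≤ limit ∧ x ∈ PySem.List.pyRange (q * q) (limit + 1) q) := by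
  refine pvSieveLoop.induct limit
    (motive := fun s p => 1 ≤ p → ∀ x : Int, (x ∈ pvSieveLoop limit s p ↔
      x ∈ s ∨ ∃ q, p ≤ q ∧ q * q ≤ limit ∧ x ∈ PySem.List.pyRange (q * q) (limit + 1) q))
    ?_ ?_ s p
  · intro s p hle ih hp x
    rw [pvSieveLoop]
    simp only [dif_pos hle]
    rw [ih (by omega) x, PySem.Set.mem_update]
    constructor
    · rintro ((hs | hr) | ⟨q, hq, hqq, hx⟩)
      · exact Or.inl hs
      · exact Or.inr ⟨p, le_refl p, hle, hr⟩
      · exact Or.inr ⟨q, by omega, hqq, hx⟩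
    · rintro (hs | ⟨q, hq, hqq, hx⟩)
      · exact Or.inl (Or.inl hs)
      · rcases eq_or_lt_of_le hq with rfl | hlt
        · exact Or.inl (Or.inr hx)
        · exact Or.inr ⟨q, by omega, hqq, hx⟩
  · intro s p hle hp x
    rw [pvSieveLoop]
    simp only [dif_neg hle]
    constructor
    · exact Or.inl
    · rintro (hs | ⟨q, hq, hqq, -⟩)
      · exact hs
      · exact absurd (le_trans (by nlinarith : p * p ≤ q * q) hqq) hle

-- for 2 ≤ x ≤ limit: x is in the composite set iff x has a divisor e with e*e ≤ x
theorem pvComposite_mem (limit x : Int) (_h2x : 2 ≤ x) (hx : x ≤ limit) :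
    x ∈ pvSieveLoop limit PySem.Set.empty 2 ↔ ∃ e, 2 ≤ e ∧ e * e ≤ x ∧ e ∣ x := by
  rw [pvSieveLoop_mem limit PySem.Set.empty 2 (by norm_num) x]
  have hemp : x ∈ (PySem.Set.empty : PySem.Set Int) ↔ False := by simp [PySem.Set.empty]
  rw [hemp, false_or]
  constructor
  · rintro ⟨q, hq, hqq, hr⟩
    rw [PySem.List.mem_pyRange_iff_of_pos (by omega)] at hr
    obtain ⟨hlo, hhi, hdvd⟩ := hr
    refine ⟨q, hq, hlo, ?_⟩
    have hq2 : q ∣ q * q := dvd_mul_left q q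
    have := dvd_add hdvd hq2
    simpa using this
  · rintro ⟨e, he, hee, hdvd⟩
    refine ⟨e, he, le_trans hee hx, ?_⟩
    rw [PySem.List.mem_pyRange_iff_of_pos (by omega)]
    exact ⟨hee, by omega, dvd_sub hdvd (dvd_mul_left e e)⟩

-- B's sieve-based primality test agrees with A's trial division up to the sieve bound
theorem pvPrime_agree (limit k : Int) (hk : k ≤ limit) :
    pvIsPrimeB limit (pvSieveLoop limit PySem.Set.empty 2) k = pvIsPrimeA k := by
  rw [Bool.eq_iff_iff, pvIsPrimeA_eq_true_iff]
  constructor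
  · intro hB
    simp [pvIsPrimeB, PySem.Set.contains_eq_listContains] at hB
    exact ⟨hB.1.1, fun e he hee hdvd =>
      hB.2 ((pvComposite_mem limit k hB.1.1 hk).2 ⟨e, he, hee, hdvd⟩)⟩
  · rintro ⟨h2, hall⟩
    have hnc : k ∉ pvSieveLoop limit PySem.Set.empty 2 := by
      intro hmem
      obtain ⟨e, he, hee, hdvd⟩ := (pvComposite_mem limit k h2 hk).1 hmem
      exact hall e he hee hdvd
    simp [pvIsPrimeB, PySem.Set.contains_eq_listContains, h2, hk]
    exact hnc

-- swapping a negated guard's branches (B's `if not-seen` vs A's `if seen: continue`)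
theorem pvIfSwap {γ : Type} (c a b : Bool) (st Z : γ) :
    (if c then if !a && !b then Z else st else st)
      = (if c then if a || b then st else Z else st) := by
  cases c <;> cases a <;> cases b <;> simp

-- un-fusing: a filtered-collect pass followed by a fold equals the fused single pass
theorem pvFuse {α β γ : Type} (l : List α) (c c' : α → Bool) (f : α → β) (G : γ → β → γ)
    (init : γ) (H : γ → α → γ)
    (hc : ∀ x ∈ l, c' x = c x)
    (hH : ∀ st q, H st q = if c' q then G st (f q) else st) :
    List.foldl G init (List.foldl (fun acc p => if c p then acc ++ [f p] else acc) [] l)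
      = List.foldl H init l := by
  rw [PySem.List.foldl_append_if, List.nil_append, List.foldl_map,
    ← PySem.List.foldl_if_eq_foldl_filter c (fun st q => G st (f q))]
  exact PySem.List.foldl_congr_mem l _ _ init (fun acc x hx => by rw [hH, hc x hx])

-- ===== VERDICT =====
theorem prime_pairs_with_gap_py_spec : Claim_equal_prime_pairs_with_gap_py := by
  intro n gap _dom
  have hnl : n ≤ (if n ≥ n - gap then n else n - gap) := by split_ifs <;> omega
  have hgl : n - gap ≤ (if n ≥ n - gap then n else n - gap) := by split_ifs <;> omega
  show prime_pairs_with_gap_py n gap = prime_pairs_with_gap_py_alt n gap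
  refine congrArg Prod.snd (pvFuse (PySem.List.pyRange 2 (n - gap + 1) 1)
    (fun p => pvIsPrimeA p && pvIsPrimeA (p + gap))
    (fun q => pvIsPrimeB (if n ≥ n - gap then n else n - gap)
        (pvSieveLoop (if n ≥ n - gap then n else n - gap) PySem.Set.empty 2) q
      && pvIsPrimeB (if n ≥ n - gap then n else n - gap)
        (pvSieveLoop (if n ≥ n - gap then n else n - gap) PySem.Set.empty 2) (q + gap))
    (fun p => (p - 1, p + gap - 1))
    (fun st ij => if st.1.contains ij.1 || st.1.contains ij.2 then st
      else ((st.1.add ij.1).add ij.2, st.2 ++ [ij]))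
    (PySem.Set.empty, [])
    (fun st q =>
      if pvIsPrimeB (if n ≥ n - gap then n else n - gap)
          (pvSieveLoop (if n ≥ n - gap then n else n - gap) PySem.Set.empty 2) q
        && pvIsPrimeB (if n ≥ n - gap then n else n - gap)
          (pvSieveLoop (if n ≥ n - gap then n else n - gap) PySem.Set.empty 2) (q + gap) then
        if !(st.1.contains (q - 1)) && !(st.1.contains (q + gap - 1)) then
          ((st.1.add (q - 1)).add (q + gap - 1), st.2 ++ [(q - 1, q + gap - 1)])
        else st
      else st)
    ?_ ?_)
  · intro q hq
    rw [PySem.List.mem_pyRange_one] at hq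
    beta_reduce
    rw [pvPrime_agree (if n ≥ n - gap then n else n - gap) q (by omega),
      pvPrime_agree (if n ≥ n - gap then n else n - gap) (q + gap) (by omega)]
  · intro st q
    exact pvIfSwap _ _ _ st _
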